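-- pv_equiv track=rewrite | github.com/MValaguz/MSql | source/examples/extract_sql_under_cursor_v_prec.py | extract_sql_under_cursor
-- ===== SOURCE A (Python) =====
-- def extract_sql_under_cursor(p_testo: str, p_cursor_pos: int):
--     """
--     Estrae l'istruzione SQL sotto la posizione p_cursor_pos in p_testo,
--     considerando come separatori i caratteri ';' e '/' ma ignorandoli se fanno parte di commenti
--     block (/* ... */) o single-line (-- ...).
--
--     Se p_cursor_pos supera la lunghezza del testo viene portato a len(p_testo).
--     Se sotto il cursore ci sono spazi, il cursore viene spostato al primo carattere
--     non-spazio alla sinistra.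
--
--     Ritorna una tupla (statement, start_idx, end_idx):
--       - statement: il testo dell'istruzione SQL ripulito da spazi, '/' e ';' ai bordi
--       - start_idx: indice di inizio (inclusivo) nell'originale p_testo
--       - end_idx: indice di fine (esclusivo) nell'originale p_testo
--     """
--     n = len(p_testo)
--
--     # 1) Clamp del cursore nell'intervallo valido
--     if p_cursor_pos > n:
--         p_cursor_pos = n
--     if p_cursor_pos < 0:
--         p_cursor_pos = 0
--
--     # 2) Se sotto il cursore ci sono spazi (o è OOB alla fine), sposto sinistra
--     if p_cursor_pos == n or p_testo[p_cursor_pos].isspace():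
--         # punto di partenza (se p_cursor_pos==n, guardo l'ultimo char)
--         i = n - 1 if p_cursor_pos == n else p_cursor_pos
--         # scendo finché trovo spazi
--         while i >= 0 and p_testo[i].isspace():
--             i -= 1
--         # se non ho trovato nulla di non-spazio, non c'è statement
--         if i < 0:
--             return "", 0, 0
--         p_cursor_pos = i
--
--     # 3) Costruisco maschera commenti
--     comment_mask = [False] * n
--     i = 0
--     while i < n:
--         if i + 1 < n and p_testo[i:i+2] == '/*':
--             j = p_testo.find('*/', i+2)
--             end_c = (j + 2) if j != -1 else n
--             for k in range(i, end_c):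
--                 comment_mask[k] = True
--             i = end_c
--         elif i + 1 < n and p_testo[i:i+2] == '--':
--             j = p_testo.find('\n', i+2)
--             end_c = j if j != -1 else n
--             for k in range(i, end_c):
--                 comment_mask[k] = True
--             i = end_c
--         else:
--             i += 1
--
--     separators = {';', '/'}
--     # 4) Trovo inizio istruzione (scan backwards)
--     start = p_cursor_pos
--     if start < n and not comment_mask[start] and p_testo[start] in separators:
--         start -= 1
--     while start > 0:
--         c = p_testo[start-1]
--         if not comment_mask[start-1] and c in separators:
--             break
--         start -= 1
--
--     # 5) Trovo fine istruzione (scan forwards)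
--     end = p_cursor_pos
--     if end > 0 and not comment_mask[end-1] and p_testo[end-1] in separators:
--         pass
--     while end < n:
--         c = p_testo[end]
--         if not comment_mask[end] and c in separators:
--             break
--         end += 1
--
--     # 6) Estraggo e ripulisco dai caratteri trim
--     raw = p_testo[start:end]
--     trim_chars = {' ', '\t', '\r', '\n', ';', '/'}
--     left = 0
--     while left < len(raw) and raw[left] in trim_chars:
--         left += 1
--     right = len(raw)
--     while right > 0 and raw[right-1] in trim_chars:
--         right -= 1
--
--     statement = raw[left:right]
--     final_start = start + left
--     final_end = start + right
--
--     return statement, final_start, final_end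
-- ===== SOURCE B (Python) =====
-- def extract_sql_under_cursor(p_testo: str, p_cursor_pos: int):
--     """Same task as A, but with a single separator-collecting pass (no comment
--     mask array, no backward character scan) and strip-based trimming."""
--     n = len(p_testo)
--
--     # 1) clamp
--     if p_cursor_pos > n:
--         p_cursor_pos = n
--     if p_cursor_pos < 0:
--         p_cursor_pos = 0
--
--     # 2) move left over whitespace
--     if p_cursor_pos == n or p_testo[p_cursor_pos].isspace():
--         i = n - 1 if p_cursor_pos == n else p_cursor_pos
--         while i >= 0 and p_testo[i].isspace():
--             i -= 1
--         if i < 0: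
--             return "", 0, 0
--         p_cursor_pos = i
--
--     # 3) one comment-skipping pass collecting separator positions in order
--     seps = []
--     i = 0
--     while i < n:
--         if p_testo.startswith('/*', i):
--             j = p_testo.find('*/', i + 2)
--             i = n if j == -1 else j + 2
--         elif p_testo.startswith('--', i):
--             j = p_testo.find('\n', i + 2)
--             i = n if j == -1 else j
--         else:
--             if p_testo[i] in ';/':
--                 seps.append(i)
--             i += 1
--
--     # 4+5) statement bounds from the sorted separator list
--     start0 = p_cursor_pos - 1 if p_cursor_pos in seps else p_cursor_pos
--     start, end = 0, n
--     for j in seps: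
--         if j < start0:
--             start = j + 1
--         if j >= p_cursor_pos:
--             end = j
--             break
--
--     # 6) trim with str.strip
--     raw = p_testo[start:end]
--     chars = " \t\r\n;/"
--     left = len(raw) - len(raw.lstrip(chars))
--     right = len(raw.rstrip(chars))
--     return raw[left:right], start + left, start + right
-- ===== Notes on version B (the rewrite author's own statement) =====
-- stated objective: alternative
-- what changed: Replaces A's comment-mask array plus backward/forward character scans with one comment-skipping pass that collects separator indices into a sorted list, reads the statement bounds off that list in a single scan, and trims via str.lstrip/rstrip.
-- intended difference: When the clamped, whitespace-adjusted cursor sits at offset 0 on a separator character that does not open a comment, A's initial 'start -= 1' leaves start = -1 and it returns ('', -1, -1) (a negative-index artefact of Python slicing); B returns ('', 0, 0), the intended in-range empty bounds. — e.g. on extract_sql_under_cursor(";", 0): A returns ("", -1, -1), B returns ("", 0, 0)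
import Mathlib
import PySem

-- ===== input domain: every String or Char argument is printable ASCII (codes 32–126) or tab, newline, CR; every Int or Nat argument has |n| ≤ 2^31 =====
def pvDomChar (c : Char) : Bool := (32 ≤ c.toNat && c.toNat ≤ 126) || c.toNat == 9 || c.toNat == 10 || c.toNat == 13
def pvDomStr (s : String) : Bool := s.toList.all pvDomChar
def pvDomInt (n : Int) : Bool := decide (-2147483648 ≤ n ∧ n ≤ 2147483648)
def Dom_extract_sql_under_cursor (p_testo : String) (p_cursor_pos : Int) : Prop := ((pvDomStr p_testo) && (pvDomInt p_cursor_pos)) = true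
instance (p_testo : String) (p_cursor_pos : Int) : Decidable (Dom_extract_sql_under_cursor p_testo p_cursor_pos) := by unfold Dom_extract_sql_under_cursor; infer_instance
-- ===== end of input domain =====

-- B replaces A's comment-mask array + backward/forward character scans by one
-- comment-skipping pass collecting separator indices, a single scan of that
-- sorted list for the bounds, and lstrip/rstrip-style trimming (objective:
-- alternative).  On the corner where A's `start -= 1` drives start to -1 (see
-- D_ below) B returns in-range indices instead; everywhere else they agree.
-- Loops are ported as structural recursion on a fuel that only makes them
-- total (fuel never runs out on the actual calls).

-- ===== shared helpers: character classes and steps 1–2 (textually identical in both Pythons) =====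
def pvIsSep (c : Char) : Bool := c == ';' || c == '/'
def pvIsTrim (c : Char) : Bool :=
  c == ' ' || c == '\t' || c == '\r' || c == '\n' || c == ';' || c == '/'
-- step 1: clamp the cursor into [0, n]
def pvClamp (n : Nat) (c : Int) : Nat :=
  (if c > (n : Int) then (n : Int) else if c < 0 then 0 else c).toNat
-- step 2 inner loop: `while i >= 0 and p_testo[i].isspace(): i -= 1` (none = fell off the left)
def pvWsLeft (cs : List Char) : Nat → Option Nat
  | 0 => if PySem.Chars.isspace (cs.getD 0 ' ') then none else some 0
  | i + 1 => if PySem.Chars.isspace (cs.getD (i + 1) ' ') then pvWsLeft cs i else some (i + 1)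
-- step 2: adjusted cursor (none = "no statement", the `return "", 0, 0` case)
def pvAdjust (cs : List Char) (c0 : Int) : Option Nat :=
  if pvClamp cs.length c0 = cs.length ∨ PySem.Chars.isspace (cs.getD (pvClamp cs.length c0) ' ') then
    pvWsLeft cs (if pvClamp cs.length c0 = cs.length then cs.length - 1 else pvClamp cs.length c0)
  else some (pvClamp cs.length c0)
-- `j = find(pat, s); end = n if j == -1 else j + add` (this find-or-end step occurs in both Pythons)
def pvFindEnd (cs : List Char) (s : Nat) (pat : List Char) (add : Nat) : Nat :=
  if PySem.Chars.findFrom cs pat (s : Int) none = -1 then cs.length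
  else (PySem.Chars.findFrom cs pat (s : Int) none).toNat + add

-- ===== PORT A =====
-- step 3: `for k in range(i, end_c): comment_mask[k] = True`
def pvMark (mask : List Bool) (a b : Nat) : List Bool :=
  (List.range' a (b - a)).foldl (fun m k => m.set k true) mask

-- step 3 main loop building the comment mask
def pvMaskLoop (cs : List Char) : Nat → Nat → List Bool → List Bool
  | 0, _, mask => mask
  | fuel + 1, i, mask =>
    if i < cs.length then
      if i + 1 < cs.length ∧ PySem.List.slice cs (some (i : Int)) (some ((i : Int) + 2)) = ['/', '*'] then
        pvMaskLoop cs fuel (pvFindEnd cs (i + 2) ['*', '/'] 2) (pvMark mask i (pvFindEnd cs (i + 2) ['*', '/'] 2))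
      else if i + 1 < cs.length ∧ PySem.List.slice cs (some (i : Int)) (some ((i : Int) + 2)) = ['-', '-'] then
        pvMaskLoop cs fuel (pvFindEnd cs (i + 2) ['\n'] 0) (pvMark mask i (pvFindEnd cs (i + 2) ['\n'] 0))
      else
        pvMaskLoop cs fuel (i + 1) mask
    else mask

-- step 4: `while start > 0: if good(start-1): break; start -= 1`
def pvBackScan (good : Nat → Bool) : Nat → Nat
  | 0 => 0
  | s + 1 => if good s then s + 1 else pvBackScan good s

-- step 5: `while end < n: if good(end): break; end += 1`
def pvFwdScan (good : Nat → Bool) (n : Nat) : Nat → Nat → Nat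
  | 0, e => e
  | fuel + 1, e => if e < n then (if good e then e else pvFwdScan good n fuel (e + 1)) else e

-- step 6: `while left < len(raw) and raw[left] in trim_chars: left += 1`
def pvTrimLeftLoop (raw : List Char) : Nat → Nat → Nat
  | 0, l => l
  | fuel + 1, l =>
    if l < raw.length then
      (if pvIsTrim (raw.getD l ' ') then pvTrimLeftLoop raw fuel (l + 1) else l)
    else l

-- step 6: `while right > 0 and raw[right-1] in trim_chars: right -= 1`
def pvTrimRightLoop (raw : List Char) : Nat → Nat
  | 0 => 0
  | r + 1 => if pvIsTrim (raw.getD r ' ') then pvTrimRightLoop raw r else r + 1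

def extract_sql_under_cursor (p_testo : String) (p_cursor_pos : Int) : String × Int × Int :=
  let cs := p_testo.toList
  let n := cs.length
  match pvAdjust cs p_cursor_pos with
  | none => ("", 0, 0)
  | some cpos =>
    let mask := pvMaskLoop cs (n + 1) 0 (List.replicate n false)
    let good := fun (k : Nat) => !(mask.getD k false) && pvIsSep (cs.getD k ' ')
    -- step 4 (start may become -1 before the backward loop, which then does not run)
    let start1 : Int := if cpos < n ∧ good cpos then (cpos : Int) - 1 else (cpos : Int)
    let start : Int := if start1 < 0 then start1 else (pvBackScan good start1.toNat : Int)
    -- step 5 (the `if … : pass` in A is a no-op and is omitted)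
    let endI := pvFwdScan good n (n + 1) cpos
    -- step 6
    let raw := PySem.List.slice cs (some start) (some (endI : Int))
    let left := pvTrimLeftLoop raw (raw.length + 1) 0
    let right := pvTrimRightLoop raw raw.length
    (String.ofList (PySem.List.slice raw (some (left : Int)) (some (right : Int))),
      start + left, start + right)

-- ===== PORT B =====
-- one comment-skipping pass collecting the separator positions in order
def pvSepsLoop (cs : List Char) : Nat → Nat → List Nat → List Nat
  | 0, _, acc => acc
  | fuel + 1, i, acc =>
    if i < cs.length then
      if PySem.Chars.startswith (cs.drop i) ['/', '*'] then
        pvSepsLoop cs fuel (pvFindEnd cs (i + 2) ['*', '/'] 2) acc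
      else if PySem.Chars.startswith (cs.drop i) ['-', '-'] then
        pvSepsLoop cs fuel (pvFindEnd cs (i + 2) ['\n'] 0) acc
      else
        pvSepsLoop cs fuel (i + 1) (if pvIsSep (cs.getD i ' ') then acc ++ [i] else acc)
    else acc

-- the `for j in seps: …  break` loop computing (start, end)
def pvBounds (seps : List Nat) (start0 : Int) (cpos : Nat) (start : Nat) (n : Nat) : Nat × Nat :=
  match seps with
  | [] => (start, n)
  | j :: rest =>
    if cpos ≤ j then (if (j : Int) < start0 then j + 1 else start, j)
    else pvBounds rest start0 cpos (if (j : Int) < start0 then j + 1 else start) n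

def extract_sql_under_cursor_alt (p_testo : String) (p_cursor_pos : Int) : String × Int × Int :=
  let cs := p_testo.toList
  let n := cs.length
  match pvAdjust cs p_cursor_pos with
  | none => ("", 0, 0)
  | some cpos =>
    let seps := pvSepsLoop cs (n + 1) 0 []
    let start0 : Int := if cpos ∈ seps then (cpos : Int) - 1 else (cpos : Int)
    let se := pvBounds seps start0 cpos 0 n
    let raw := PySem.List.slice cs (some (se.1 : Int)) (some (se.2 : Int))
    -- lstrip/rstrip with an explicit chars set = dropWhile on each end (exact)
    let left := raw.length - (raw.dropWhile pvIsTrim).length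
    let right := ((raw.reverse.dropWhile pvIsTrim).reverse).length
    (String.ofList (PySem.List.slice raw (some (left : Int)) (some (right : Int))),
      (se.1 : Int) + left, (se.1 : Int) + right)

-- ===== PRECONDITION & SPEC =====
-- When the clamped, whitespace-adjusted cursor sits at offset 0 on a separator
-- character that does not open a comment, A's initial `start -= 1` leaves
-- start = -1 and it returns ("", -1, -1) (a negative-index artefact of Python
-- slicing); B returns ("", 0, 0), the intended in-range empty bounds.
def D_extract_sql_under_cursor (p_testo : String) (p_cursor_pos : Int) : Prop :=
  let cs := p_testo.toList
  let n := cs.length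
  let c : Nat := (max 0 (min p_cursor_pos (n : Int))).toNat
  0 < n ∧
  (cs.getD 0 ' ' = ';' ∨ (cs.getD 0 ' ' = '/' ∧ cs.getD 1 ' ' ≠ '*')) ∧
  (if c = n ∨ PySem.Chars.isspace (cs.getD c ' ') then
      (List.range' 1 (if c = n then n - 1 else c)).all
        (fun j => PySem.Chars.isspace (cs.getD j ' ')) = true
    else c = 0)
instance (p_testo : String) (p_cursor_pos : Int) : Decidable (D_extract_sql_under_cursor p_testo p_cursor_pos) := by
  unfold D_extract_sql_under_cursor; infer_instance

def Spec_extract_sql_under_cursor (p_testo : String) (p_cursor_pos : Int) (out : String × Int × Int) : Prop :=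
  ¬ D_extract_sql_under_cursor p_testo p_cursor_pos → out = extract_sql_under_cursor_alt p_testo p_cursor_pos
instance (p_testo : String) (p_cursor_pos : Int) (out : String × Int × Int) : Decidable (Spec_extract_sql_under_cursor p_testo p_cursor_pos out) := by
  unfold Spec_extract_sql_under_cursor; infer_instance

def pvDiffWitness_extract_sql_under_cursor : String × Int := (";", 0)
def pvDiffWitnessOut_extract_sql_under_cursor : (String × Int × Int) × (String × Int × Int) :=
  (("", -1, -1), ("", 0, 0))

-- ===== CLAIM (what is proved, stated in full; the proofs are below) =====
def Claim_unchanged_extract_sql_under_cursor : Prop := ∀ (p_testo : String) (p_cursor_pos : Int), Dom_extract_sql_under_cursor p_testo p_cursor_pos → Spec_extract_sql_under_cursor p_testo p_cursor_pos (extract_sql_under_cursor p_testo p_cursor_pos)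
def Claim_changed_extract_sql_under_cursor : Prop := Dom_extract_sql_under_cursor (pvDiffWitness_extract_sql_under_cursor.1) (pvDiffWitness_extract_sql_under_cursor.2) ∧ D_extract_sql_under_cursor (pvDiffWitness_extract_sql_under_cursor.1) (pvDiffWitness_extract_sql_under_cursor.2) ∧ extract_sql_under_cursor (pvDiffWitness_extract_sql_under_cursor.1) (pvDiffWitness_extract_sql_under_cursor.2) = pvDiffWitnessOut_extract_sql_under_cursor.1 ∧ extract_sql_under_cursor_alt (pvDiffWitness_extract_sql_under_cursor.1) (pvDiffWitness_extract_sql_under_cursor.2) = pvDiffWitnessOut_extract_sql_under_cursor.2 ∧ pvDiffWitnessOut_extract_sql_under_cursor.1 ≠ pvDiffWitnessOut_extract_sql_under_cursor.2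

-- ===== LEMMAS AND PROOFS =====

theorem pvFindEnd_ge (cs : List Char) (s : Nat) (pat : List Char) (add : Nat)
    (hs : s ≤ cs.length) : s ≤ pvFindEnd cs s pat add := by
  unfold pvFindEnd
  split
  · exact hs
  · rename_i h
    have := (PySem.Chars.findFrom_natCast_spec cs pat s hs h).1
    omega
theorem pvFindEnd_le (cs : List Char) (s : Nat) (pat : List Char) (add : Nat)
    (hs : s ≤ cs.length) (hp : add ≤ pat.length) (hp1 : 0 < pat.length) : pvFindEnd cs s pat add ≤ cs.length := by
  unfold pvFindEnd
  split
  · exact le_rfl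
  · rename_i h
    have hsp := PySem.Chars.findFrom_natCast_spec cs pat s hs h
    have h1 := hsp.1
    have h2 := hsp.2.1.length_le
    simp only [List.length_drop] at h2
    omega

theorem set_getD (mask : List Bool) (a k : Nat) :
    (mask.set a true).getD k false = if k = a ∧ k < mask.length then true else mask.getD k false := by
  simp only [List.getD, List.getElem?_set]
  by_cases h : a = k
  · subst h
    by_cases h2 : a < mask.length <;> simp [h2]
  · rw [if_neg h, if_neg (by intro h'; exact h h'.1.symm)]

theorem foldl_set_getD (d : Nat) : ∀ (a : Nat) (mask : List Bool) (k : Nat),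
    ((List.range' a d).foldl (fun m k => m.set k true) mask).getD k false =
      (if a ≤ k ∧ k < a + d ∧ k < mask.length then true else mask.getD k false) := by
  induction d with
  | zero => intro a mask k; simp; omega
  | succ d ih =>
    intro a mask k
    rw [List.range'_succ, List.foldl_cons, ih, set_getD]
    simp only [List.length_set]
    split_ifs <;> first | rfl | omega

theorem pvMark_getD (mask : List Bool) (a b k : Nat) :
    (pvMark mask a b).getD k false =
      (if a ≤ k ∧ k < b ∧ k < mask.length then true else mask.getD k false) := by
  unfold pvMark
  rw [foldl_set_getD]
  split_ifs <;> first | rfl | omega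

theorem foldl_set_length (d : Nat) : ∀ (a : Nat) (mask : List Bool),
    ((List.range' a d).foldl (fun m k => m.set k true) mask).length = mask.length := by
  induction d with
  | zero => simp
  | succ d ih => intro a mask; rw [List.range'_succ, List.foldl_cons, ih, List.length_set]

theorem pvMark_length (mask : List Bool) (a b : Nat) :
    (pvMark mask a b).length = mask.length := by
  unfold pvMark; rw [foldl_set_length]

theorem pvMaskLoop_getD_lt (cs : List Char) (fuel : Nat) : ∀ (i k : Nat) (mask : List Bool),
    k < i →
    (pvMaskLoop cs fuel i mask).getD k false = mask.getD k false := by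
  induction fuel with
  | zero => intros; rfl
  | succ fuel ih =>
    intro i k mask hk
    show (if i < cs.length then _ else mask).getD k false = _
    split
    · rename_i hi
      split
      · rename_i h2
        have hge := pvFindEnd_ge cs (i + 2) ['*', '/'] 2 (by omega)
        rw [ih _ k _ (by omega), pvMark_getD, if_neg (by omega)]
      · split
        · rename_i h3
          have hge := pvFindEnd_ge cs (i + 2) ['\n'] 0 (by omega)
          rw [ih _ k _ (by omega), pvMark_getD, if_neg (by omega)]
        · exact ih _ k _ (by omega)
    · rfl

theorem pvCond_iff (cs : List Char) (i : Nat) (a b : Char) :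
    (i + 1 < cs.length ∧ PySem.List.slice cs (some (i : Int)) (some ((i : Int) + 2)) = [a, b]) ↔
      PySem.Chars.startswith (cs.drop i) [a, b] = true := by
  have hcast : ((i : Int) + 2) = ((i + 2 : Nat) : Int) := by push_cast; ring
  rw [hcast, PySem.List.slice_natCast, PySem.Chars.startswith_iff, List.prefix_iff_eq_take]
  have hl : i + 2 - i = 2 := by omega
  rw [hl]
  constructor
  · rintro ⟨h1, h2⟩; simp [h2]
  · intro h
    refine ⟨?_, h.symm⟩
    have := congrArg List.length h
    simp [List.length_take, List.length_drop] at this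
    omega

theorem range'_split (a b n : Nat) (h1 : a ≤ b) (h2 : b ≤ n) :
    List.range' a (n - a) = List.range' a (b - a) ++ List.range' b (n - b) := by
  conv_rhs => rw [show List.range' b (n - b) = List.range' (a + 1 * (b - a)) (n - b) by
    rw [show a + 1 * (b - a) = b by omega]]
  rw [List.range'_append]
  rw [show (b - a) + (n - b) = n - a by omega]

theorem pvSepsLoop_eq (cs : List Char) (fuel : Nat) :
    ∀ (i : Nat) (mask : List Bool) (acc : List Nat),
    cs.length < i + fuel → mask.length = cs.length →
    (∀ k, i ≤ k → mask.getD k false = false) →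
    pvSepsLoop cs fuel i acc =
      acc ++ (List.range' i (cs.length - i)).filter
        (fun k => !((pvMaskLoop cs fuel i mask).getD k false) && pvIsSep (cs.getD k ' ')) := by
  induction fuel with
  | zero =>
    intro i mask acc hf _ _
    rw [show cs.length - i = 0 by omega]
    simp [pvSepsLoop]
  | succ fuel ih =>
    intro i mask acc hf hlen hmask
    by_cases hi : i < cs.length
    · by_cases hc1 : PySem.Chars.startswith (cs.drop i) ['/', '*'] = true
      · -- '/*' branch
        have hc1' := (pvCond_iff cs i '/' '*').mpr hc1
        set endC := pvFindEnd cs (i + 2) ['*', '/'] 2 with hendC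
        have hge : i + 2 ≤ endC := pvFindEnd_ge cs (i + 2) _ _ (by omega)
        have hle : endC ≤ cs.length := pvFindEnd_le cs (i + 2) _ _ (by omega) (by simp) (by simp)
        have hS : pvSepsLoop cs (fuel + 1) i acc = pvSepsLoop cs fuel endC acc := by
          show (if i < cs.length then _ else _) = _
          rw [if_pos hi, if_pos hc1]
        have hM : pvMaskLoop cs (fuel + 1) i mask
            = pvMaskLoop cs fuel endC (pvMark mask i endC) := by
          show (if i < cs.length then _ else _) = _
          rw [if_pos hi, if_pos hc1']
        rw [hS, hM, ih endC (pvMark mask i endC) acc (by omega)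
          (by rw [pvMark_length]; exact hlen)
          (by intro k hk; rw [pvMark_getD, if_neg (by omega)]; exact hmask k (by omega))]
        congr 1
        rw [range'_split i endC cs.length (by omega) hle, List.filter_append]
        have hnil : (List.range' i (endC - i)).filter
            (fun k => !((pvMaskLoop cs fuel endC (pvMark mask i endC)).getD k false) && pvIsSep (cs.getD k ' ')) = [] := by
          apply List.filter_eq_nil_iff.mpr
          intro k hk
          obtain ⟨j, hj1, hj2⟩ := List.mem_range'.mp hk
          have hk1 : i ≤ k := by omega
          have hk2 : k < endC := by omega
          rw [pvMaskLoop_getD_lt cs fuel endC k _ hk2, pvMark_getD,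
            if_pos ⟨hk1, hk2, by omega⟩]
          simp
        rw [hnil, List.nil_append]
      · by_cases hc2 : PySem.Chars.startswith (cs.drop i) ['-', '-'] = true
        · -- '--' branch
          have hc2' := (pvCond_iff cs i '-' '-').mpr hc2
          have hc1'' : ¬(i + 1 < cs.length ∧ PySem.List.slice cs (some (i : Int)) (some ((i : Int) + 2)) = ['/', '*']) := by
            intro h; exact hc1 ((pvCond_iff cs i '/' '*').mp h)
          set endC := pvFindEnd cs (i + 2) ['\n'] 0 with hendC
          have hge : i + 2 ≤ endC := pvFindEnd_ge cs (i + 2) _ _ (by omega)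
          have hle : endC ≤ cs.length := pvFindEnd_le cs (i + 2) _ _ (by omega) (by simp) (by simp)
          have hS : pvSepsLoop cs (fuel + 1) i acc = pvSepsLoop cs fuel endC acc := by
            show (if i < cs.length then _ else _) = _
            rw [if_pos hi, if_neg (by simp [hc1]), if_pos hc2]
          have hM : pvMaskLoop cs (fuel + 1) i mask
              = pvMaskLoop cs fuel endC (pvMark mask i endC) := by
            show (if i < cs.length then _ else _) = _
            rw [if_pos hi, if_neg hc1'', if_pos hc2']
          rw [hS, hM, ih endC (pvMark mask i endC) acc (by omega)
            (by rw [pvMark_length]; exact hlen)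
            (by intro k hk; rw [pvMark_getD, if_neg (by omega)]; exact hmask k (by omega))]
          congr 1
          rw [range'_split i endC cs.length (by omega) hle, List.filter_append]
          have hnil : (List.range' i (endC - i)).filter
              (fun k => !((pvMaskLoop cs fuel endC (pvMark mask i endC)).getD k false) && pvIsSep (cs.getD k ' ')) = [] := by
            apply List.filter_eq_nil_iff.mpr
            intro k hk
            obtain ⟨j, hj1, hj2⟩ := List.mem_range'.mp hk
            have hk1 : i ≤ k := by omega
            have hk2 : k < endC := by omega
            rw [pvMaskLoop_getD_lt cs fuel endC k _ hk2, pvMark_getD,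
              if_pos ⟨hk1, hk2, by omega⟩]
            simp
          rw [hnil, List.nil_append]
        · -- plain character
          have hc1'' : ¬(i + 1 < cs.length ∧ PySem.List.slice cs (some (i : Int)) (some ((i : Int) + 2)) = ['/', '*']) := by
            intro h; exact hc1 ((pvCond_iff cs i '/' '*').mp h)
          have hc2'' : ¬(i + 1 < cs.length ∧ PySem.List.slice cs (some (i : Int)) (some ((i : Int) + 2)) = ['-', '-']) := by
            intro h; exact hc2 ((pvCond_iff cs i '-' '-').mp h)
          have hS : pvSepsLoop cs (fuel + 1) i acc
              = pvSepsLoop cs fuel (i + 1) (if pvIsSep (cs.getD i ' ') then acc ++ [i] else acc) := by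
            show (if i < cs.length then _ else _) = _
            rw [if_pos hi, if_neg (by simp [hc1]), if_neg (by simp [hc2])]
          have hM : pvMaskLoop cs (fuel + 1) i mask = pvMaskLoop cs fuel (i + 1) mask := by
            show (if i < cs.length then _ else _) = _
            rw [if_pos hi, if_neg hc1'', if_neg hc2'']
          rw [hS, hM, ih (i + 1) mask _ (by omega) hlen
            (fun k hk => hmask k (by omega))]
          have hr : List.range' i (cs.length - i) = i :: List.range' (i + 1) (cs.length - (i + 1)) := by
            rw [show cs.length - i = (cs.length - (i + 1)) + 1 by omega, List.range'_succ]
          rw [hr, List.filter_cons]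
          have hPi : (!((pvMaskLoop cs fuel (i + 1) mask).getD i false) && pvIsSep (cs.getD i ' '))
              = pvIsSep (cs.getD i ' ') := by
            rw [pvMaskLoop_getD_lt cs fuel (i + 1) i mask (by omega), hmask i le_rfl]
            simp
          rw [hPi]
          by_cases hsep : pvIsSep (cs.getD i ' ') = true
          · rw [if_pos hsep, if_pos hsep]; simp
          · rw [if_neg hsep, if_neg hsep]
    · have : cs.length - i = 0 := by omega
      rw [this]
      show (if i < cs.length then _ else _) = _
      rw [if_neg hi]
      simp

theorem pvBackScan_eq (good : Nat → Bool) (s : Nat) :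
    pvBackScan good s = ((List.range s).filter good).foldl (fun _ j => j + 1) 0 := by
  induction s with
  | zero => simp [pvBackScan]
  | succ s ih =>
    rw [List.range_succ, List.filter_append, List.foldl_append]
    show (if good s then s + 1 else pvBackScan good s) = _
    by_cases h : good s
    · simp [h]
    · simp [h, ih]

theorem pvFwdScan_eq (good : Nat → Bool) (n : Nat) : ∀ (fuel e : Nat), n < e + fuel → e ≤ n →
    pvFwdScan good n fuel e = ((List.range' e (n - e)).filter good).headD n := by
  intro fuel
  induction fuel with
  | zero => intro e h1 h2; rw [show e = n by omega]; simp [pvFwdScan]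
  | succ fuel ih =>
    intro e h1 h2
    show (if e < n then (if good e then e else pvFwdScan good n fuel (e + 1)) else e) = _
    by_cases he : e < n
    · rw [if_pos he]
      rw [show n - e = (n - (e + 1)) + 1 by omega, List.range'_succ, List.filter_cons]
      by_cases hg : good e
      · simp [hg]
      · simp only [hg, Bool.false_eq_true, if_false]
        exact ih (e + 1) (by omega) (by omega)
    · rw [if_neg he, show e = n by omega]
      simp

theorem pvBounds_eq (start0 : Int) (cpos n : Nat) (h0 : start0 ≤ (cpos : Int)) :
    ∀ (L : List Nat) (st : Nat), List.Pairwise (· < ·) L →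
    pvBounds L start0 cpos st n =
      ((L.filter (fun (j : Nat) => decide ((j : Int) < start0))).foldl (fun _ j => j + 1) st,
        (L.filter (fun j => decide (cpos ≤ j))).headD n) := by
  intro L
  induction L with
  | nil => intro st _; simp [pvBounds]
  | cons j rest ih =>
    intro st hp
    obtain ⟨hgt, hrest⟩ := List.pairwise_cons.mp hp
    show (if cpos ≤ j then _ else _) = _
    by_cases hj : cpos ≤ j
    · rw [if_pos hj]
      have hns : ¬ ((j : Int) < start0) := by omega
      rw [if_neg hns]
      have hfe : rest.filter (fun (x : Nat) => decide ((x : Int) < start0)) = [] :=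
        List.filter_eq_nil_iff.mpr (by intro x hx; have := hgt x hx; simp; omega)
      rw [List.filter_cons, List.filter_cons, hfe]
      simp [hns, hj]
    · rw [if_neg hj]
      by_cases hlt : (j : Int) < start0
      · rw [if_pos hlt, ih _ hrest, List.filter_cons, List.filter_cons]
        simp [hlt, hj]
      · rw [if_neg hlt, ih _ hrest, List.filter_cons, List.filter_cons]
        simp [hlt, hj]

theorem pvRangeFilter_lt (n s : Nat) (hs : s ≤ n) :
    (List.range n).filter (fun j => decide (j < s)) = List.range s := by
  have h1 : List.range n = List.range s ++ List.range' s (n - s) := by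
    rw [List.range_eq_range']
    conv_rhs => rw [List.range_eq_range']
    rw [show List.range' s (n - s) = List.range' (0 + 1 * s) (n - s) by norm_num,
      List.range'_append, show s + (n - s) = n by omega]
  rw [h1, List.filter_append]
  have h2 : (List.range s).filter (fun j => decide (j < s)) = List.range s :=
    List.filter_eq_self.mpr (by intro a ha; simpa using List.mem_range.mp ha)
  have h3 : (List.range' s (n - s)).filter (fun j => decide (j < s)) = [] :=
    List.filter_eq_nil_iff.mpr (by
      intro a ha
      obtain ⟨j, hj1, hj2⟩ := List.mem_range'.mp ha
      simp; omega)
  rw [h2, h3, List.append_nil]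

theorem pvRangeFilter_ge (n s : Nat) (hs : s ≤ n) :
    (List.range n).filter (fun j => decide (s ≤ j)) = List.range' s (n - s) := by
  have h1 : List.range n = List.range s ++ List.range' s (n - s) := by
    rw [List.range_eq_range']
    conv_rhs => rw [List.range_eq_range']
    rw [show List.range' s (n - s) = List.range' (0 + 1 * s) (n - s) by norm_num,
      List.range'_append, show s + (n - s) = n by omega]
  rw [h1, List.filter_append]
  have h2 : (List.range s).filter (fun j => decide (s ≤ j)) = [] :=
    List.filter_eq_nil_iff.mpr (by intro a ha; simpa using List.mem_range.mp ha)
  have h3 : (List.range' s (n - s)).filter (fun j => decide (s ≤ j)) = List.range' s (n - s) :=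
    List.filter_eq_self.mpr (by
      intro a ha
      obtain ⟨j, hj1, hj2⟩ := List.mem_range'.mp ha
      simp; omega)
  rw [h2, h3, List.nil_append]

theorem pvTrimLeftLoop_eq (raw : List Char) : ∀ (fuel l : Nat),
    raw.length < l + fuel → l ≤ raw.length →
    pvTrimLeftLoop raw fuel l = l + (List.takeWhile pvIsTrim (raw.drop l)).length := by
  intro fuel
  induction fuel with
  | zero => intro l h1 h2; rw [show l = raw.length by omega]; simp [pvTrimLeftLoop]
  | succ fuel ih =>
    intro l h1 h2
    show (if l < raw.length then _ else l) = _
    by_cases hl : l < raw.length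
    · rw [if_pos hl]
      have hdrop : raw.drop l = raw[l] :: raw.drop (l + 1) := List.drop_eq_getElem_cons hl
      have hgd : raw.getD l ' ' = raw[l] := by simp [List.getD, List.getElem?_eq_getElem hl]
      rw [hdrop, List.takeWhile_cons, hgd]
      by_cases ht : pvIsTrim raw[l]
      · rw [if_pos ht, if_pos ht, ih (l + 1) (by omega) (by omega)]
        simp; omega
      · rw [if_neg ht, if_neg ht]; simp
    · rw [if_neg hl, show l = raw.length by omega]; simp

theorem pvTrimRightLoop_eq (raw : List Char) : ∀ (r : Nat), r ≤ raw.length →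
    pvTrimRightLoop raw r = r - (List.takeWhile pvIsTrim (raw.take r).reverse).length := by
  intro r
  induction r with
  | zero => intro _; simp [pvTrimRightLoop]
  | succ r ih =>
    intro hr
    show (if pvIsTrim (raw.getD r ' ') then pvTrimRightLoop raw r else r + 1) = _
    have hgd : raw.getD r ' ' = raw[r]'(by omega) := by
      simp [List.getD, List.getElem?_eq_getElem (show r < raw.length by omega)]
    have htake : (raw.take (r + 1)).reverse = raw[r]'(by omega) :: (raw.take r).reverse := by
      rw [List.take_add_one, List.getElem?_eq_getElem (show r < raw.length by omega)]
      simp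
    rw [htake, List.takeWhile_cons, hgd]
    by_cases ht : pvIsTrim (raw[r]'(by omega))
    · rw [if_pos ht, if_pos ht, ih (by omega)]
      have hle : (List.takeWhile pvIsTrim (raw.take r).reverse).length ≤ r := by
        have := (List.takeWhile_sublist (p := pvIsTrim) (l := (raw.take r).reverse)).length_le
        simp [List.length_reverse, List.length_take] at this
        omega
      simp only [List.length_cons]
      omega
    · rw [if_neg ht, if_neg ht]; simp

theorem pvClamp_eq (n : Nat) (c : Int) : pvClamp n c = (max 0 (min c (n : Int))).toNat := by
  unfold pvClamp
  split_ifs <;> omega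

theorem pvWsLeft_le (cs : List Char) : ∀ (k i : Nat), pvWsLeft cs k = some i → i ≤ k := by
  intro k
  induction k with
  | zero =>
    intro i h
    unfold pvWsLeft at h
    split at h
    · exact absurd h (by simp)
    · cases h; exact le_rfl
  | succ k ih =>
    intro i h
    unfold pvWsLeft at h
    split at h
    · exact le_trans (ih i h) (by omega)
    · cases h; exact le_rfl

theorem pvAdjust_le (cs : List Char) (c : Int) (cpos : Nat)
    (h : pvAdjust cs c = some cpos) : cpos ≤ cs.length := by
  unfold pvAdjust at h
  have hc : pvClamp cs.length c ≤ cs.length := by rw [pvClamp_eq]; omega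
  split at h
  · split at h
    · exact le_trans (pvWsLeft_le cs _ _ h) (by omega)
    · exact le_trans (pvWsLeft_le cs _ _ h) (by omega)
  · cases h; exact hc

theorem pvWsLeft_zero_spaces (cs : List Char) : ∀ (k : Nat), pvWsLeft cs k = some 0 →
    ∀ j ∈ List.range' 1 k, PySem.Chars.isspace (cs.getD j ' ') = true := by
  intro k
  induction k with
  | zero => intro _ j hj; simp at hj
  | succ k ih =>
    intro h j hj
    unfold pvWsLeft at h
    split at h
    · rename_i hsp
      obtain ⟨m, hm1, hm2⟩ := List.mem_range'.mp hj
      by_cases hjk : j = k + 1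
      · rw [hjk]; exact hsp
      · exact ih h j (List.mem_range'.mpr ⟨m, by omega, by omega⟩)
    · cases h

-- the head of the mask: position 0 is commented iff the text opens a comment
theorem pvSlice2 (c0 c1 : Char) (rest : List Char) :
    PySem.List.slice (c0 :: c1 :: rest) (some ((0 : Nat) : Int)) (some (((0 : Nat) : Int) + 2)) = [c0, c1] := by
  have hcast : (((0 : Nat) : Int) + 2) = ((2 : Nat) : Int) := by norm_num
  rw [hcast, PySem.List.slice_natCast]
  simp

theorem pvD_of_zero (p_testo : String) (c : Int)
    (hadj : pvAdjust p_testo.toList c = some 0)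
    (hgood : (!((pvMaskLoop p_testo.toList (p_testo.toList.length + 1) 0
        (List.replicate p_testo.toList.length false)).getD 0 false) &&
        pvIsSep (p_testo.toList.getD 0 ' ')) = true) :
    D_extract_sql_under_cursor p_testo c := by
  set cs := p_testo.toList with hcs
  set n := cs.length with hn
  have hsep : pvIsSep (cs.getD 0 ' ') = true := by
    have := hgood; simp only [Bool.and_eq_true] at this; exact this.2
  have hmaskf : (pvMaskLoop cs (n + 1) 0 (List.replicate n false)).getD 0 false = false := by
    have := hgood; simp only [Bool.and_eq_true, Bool.not_eq_true'] at this; exact this.1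
  have hn0 : 0 < n := by
    rcases hcc : cs with _ | ⟨c0, rest⟩
    · rw [hcc] at hsep; simp [pvIsSep] at hsep
    · rw [hn, hcc]; simp
  obtain ⟨c0, rest, hcc⟩ : ∃ c0 rest, cs = c0 :: rest := by
    cases hcc : cs
    · rw [hcc] at hn; simp [hn] at hn0
    · exact ⟨_, _, rfl⟩
  have hgd0 : cs.getD 0 ' ' = c0 := by rw [hcc]; rfl
  have hsep0 : c0 = ';' ∨ c0 = '/' := by
    rw [hgd0] at hsep
    simp [pvIsSep] at hsep
    rcases hsep with h | h <;> [left; right] <;> exact h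
  -- if the text opens a block comment, position 0 would be masked
  have hnotblock : ¬ (0 + 1 < n ∧ PySem.List.slice cs (some ((0 : Nat) : Int)) (some (((0 : Nat) : Int) + 2)) = ['/', '*']) := by
    rintro ⟨h1, h2⟩
    have hM : (pvMaskLoop cs (n + 1) 0 (List.replicate n false)).getD 0 false = true := by
      show ((if 0 < cs.length then _ else _ : List Bool)).getD 0 false = true
      rw [if_pos (by omega), if_pos ⟨h1, h2⟩]
      have hge : 0 + 2 ≤ pvFindEnd cs (0 + 2) ['*', '/'] 2 := pvFindEnd_ge cs _ _ _ (by omega)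
      rw [pvMaskLoop_getD_lt cs _ _ _ _ (by omega), pvMark_getD,
        if_pos ⟨by omega, by omega, by simp [List.length_replicate]; omega⟩]
    rw [hM] at hmaskf; cases hmaskf
  have hkey : cs.getD 0 ' ' = ';' ∨ (cs.getD 0 ' ' = '/' ∧ cs.getD 1 ' ' ≠ '*') := by
    rcases hsep0 with h | h
    · left; rw [hgd0, h]
    · right
      refine ⟨by rw [hgd0, h], ?_⟩
      intro hstar
      obtain ⟨c1, rest', hrr⟩ : ∃ c1 rest', rest = c1 :: rest' := by
        cases hrr : rest
        · rw [hcc, hrr] at hstar; simp [List.getD] at hstar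
        · exact ⟨_, _, rfl⟩
      have hc1 : c1 = '*' := by rw [hcc, hrr] at hstar; simpa [List.getD] using hstar
      apply hnotblock
      constructor
      · rw [hn, hcc, hrr]; simp
      · rw [hcc, hrr, pvSlice2, h, hc1]
  -- now the cursor clause
  unfold pvAdjust at hadj
  rw [pvClamp_eq] at hadj
  rw [← hn] at hadj
  simp only [D_extract_sql_under_cursor]
  rw [← hcs, ← hn]
  refine ⟨hn0, hkey, ?_⟩
  split at hadj
  · rename_i hcond
    rw [if_pos hcond]
    apply List.all_eq_true.mpr
    intro j hj
    exact pvWsLeft_zero_spaces cs _ hadj j hj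
  · rename_i hcond
    rw [if_neg hcond]
    exact Option.some.inj hadj

-- ===== VERDICT (by name: the statements are the Claim_ definitions above) =====
theorem extract_sql_under_cursor_spec : Claim_unchanged_extract_sql_under_cursor := by
  intro p_testo p_cursor_pos _hDom
  unfold Spec_extract_sql_under_cursor
  intro hD
  cases hadj : pvAdjust p_testo.toList p_cursor_pos with
  | none =>
    simp only [extract_sql_under_cursor, extract_sql_under_cursor_alt, hadj]
  | some cpos =>
    simp only [extract_sql_under_cursor, extract_sql_under_cursor_alt, hadj]
    set cs := p_testo.toList with hcs
    set n := cs.length with hn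
    set mask := pvMaskLoop cs (n + 1) 0 (List.replicate n false) with hmask
    set good := fun (k : Nat) => !(mask.getD k false) && pvIsSep (cs.getD k ' ') with hgood
    have hcn : cpos ≤ n := pvAdjust_le cs p_cursor_pos cpos hadj
    -- the separator list
    have hseps : pvSepsLoop cs (n + 1) 0 [] = (List.range n).filter good := by
      rw [pvSepsLoop_eq cs (n + 1) 0 (List.replicate n false) [] (by omega)
        (by simpa using hn) (by intro k _; simp)]
      rw [List.nil_append, List.range_eq_range']
      rfl
    have hsorted : List.Pairwise (· < ·) ((List.range n).filter good) :=
      List.Pairwise.filter _ List.pairwise_lt_range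
    have hgoodlt : ∀ k, good k = true → k < n := by
      intro k hk
      by_contra h
      have : cs.getD k ' ' = ' ' := by
        rw [List.getD_eq_getElem?_getD, List.getElem?_eq_none (by omega)]
        rfl
      rw [hgood] at hk
      simp only [this] at hk
      simp [pvIsSep] at hk
    have hmem : (cpos ∈ pvSepsLoop cs (n + 1) 0 []) ↔ (cpos < n ∧ good cpos = true) := by
      rw [hseps, List.mem_filter, List.mem_range]
    -- unify the start positions
    have hkey : ∀ s : Nat, s ≤ cpos →
        pvBounds (pvSepsLoop cs (n + 1) 0 []) (s : Int) cpos 0 n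
          = (pvBackScan good s, pvFwdScan good n (n + 1) cpos) := by
      intro s hs
      have hsn : s ≤ n := le_trans hs hcn
      rw [hseps, pvBounds_eq _ _ _ (by exact_mod_cast hs) _ _ hsorted]
      have hcast : ∀ j : Nat, (decide ((j : Int) < (s : Int))) = decide (j < s) := by
        intro j; simp
      have hf1 : ((List.range n).filter good).filter (fun (j : Nat) => decide ((j : Int) < (s : Int)))
          = (List.range s).filter good := by
        rw [List.filter_comm]
        have hcg : (List.range n).filter (fun (j : Nat) => decide ((j : Int) < (s : Int)))
            = (List.range n).filter (fun j => decide (j < s)) :=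
          List.filter_congr (fun j _ => hcast j)
        rw [hcg, pvRangeFilter_lt n s hsn]
      have hf2 : ((List.range n).filter good).filter (fun j => decide (cpos ≤ j))
          = (List.range' cpos (n - cpos)).filter good := by
        rw [List.filter_comm, pvRangeFilter_ge n cpos hcn]
      rw [hf1, hf2, ← pvBackScan_eq, ← pvFwdScan_eq good n (n + 1) cpos (by omega) hcn]
    -- start index agreement
    obtain ⟨s, hsc, hA1, hB1⟩ : ∃ s : Nat, s ≤ cpos ∧
        ((if cpos < n ∧ good cpos = true then (cpos : Int) - 1 else (cpos : Int)) = (s : Int)) ∧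
        ((if cpos ∈ pvSepsLoop cs (n + 1) 0 [] then (cpos : Int) - 1 else (cpos : Int)) = (s : Int)) := by
      by_cases hg : cpos < n ∧ good cpos = true
      · have hne : cpos ≠ 0 := by
          intro h0
          apply hD
          apply pvD_of_zero p_testo p_cursor_pos
          · rw [h0] at hadj; exact hadj
          · have := hg.2; rw [h0] at this; exact this
        exact ⟨cpos - 1, by omega, by rw [if_pos hg]; omega,
          by rw [if_pos (hmem.mpr hg)]; omega⟩
      · exact ⟨cpos, le_rfl, by rw [if_neg hg],
          by rw [if_neg (fun h => hg (hmem.mp h))]⟩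
    rw [hA1, hB1]
    rw [if_neg (show ¬((s : Int) < 0) by omega), Int.toNat_natCast, hkey s hsc]
    set raw := PySem.List.slice cs (some ((pvBackScan good s : Nat) : Int))
      (some ((pvFwdScan good n (n + 1) cpos : Nat) : Int)) with hraw
    have hlen := congrArg List.length (List.takeWhile_append_dropWhile (p := pvIsTrim) (l := raw))
    rw [List.length_append] at hlen
    have hleft : pvTrimLeftLoop raw (raw.length + 1) 0
        = raw.length - (raw.dropWhile pvIsTrim).length := by
      rw [pvTrimLeftLoop_eq raw (raw.length + 1) 0 (by omega) (by omega)]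
      rw [List.drop_zero]
      omega
    have hlenr := congrArg List.length
      (List.takeWhile_append_dropWhile (p := pvIsTrim) (l := raw.reverse))
    rw [List.length_append] at hlenr
    have hright : pvTrimRightLoop raw raw.length
        = ((raw.reverse.dropWhile pvIsTrim).reverse).length := by
      rw [pvTrimRightLoop_eq raw raw.length le_rfl, List.take_length, List.length_reverse]
      rw [List.length_reverse] at hlenr
      omega
    rw [hleft, hright]

theorem extract_sql_under_cursor_changed : Claim_changed_extract_sql_under_cursor := by
  unfold Claim_changed_extract_sql_under_cursor; decide
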